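-- pv_equiv track=rewrite | github.com/peterthomson2000/Worst-Case-Holdem | worst_case_holdem.py | _is_color_clash
-- ===== SOURCE A (Python) =====
-- from collections import Counter
-- from typing import List, Sequence, Tuple
--
-- def _is_faux_flush(suits: Sequence[int]) -> bool:
--     counts = Counter(suits)
--     return sorted(counts.values()) == [1, 4]
--
-- def _is_color_clash(ranks: Sequence[int], suits: Sequence[int]) -> bool:
--     # Faux flush + a pair whose two cards are split across the main suit and the off-suit.
--     if not _is_faux_flush(suits):
--         return False
--
--     suit_counts = Counter(suits)
--     main_suit, _ = max(suit_counts.items(), key=lambda x: x[1])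
--     off_suit = next(s for s in suit_counts if s != main_suit)
--
--     # Map rank -> list of suits
--     by_rank: dict[int, List[int]] = {}
--     for r, s in zip(ranks, suits):
--         by_rank.setdefault(r, []).append(s)
--
--     for suitelist in by_rank.values():
--         if len(suitelist) == 2:
--             # Check that the pair is split between main and off suit
--             if main_suit in suitelist and off_suit in suitelist:
--                 return True
--
--     return False
-- ===== SOURCE B (Python) =====
-- from collections import Counter
--
--
-- def _is_color_clash(ranks, suits):
--     counts = Counter(suits)
--     if sorted(counts.values()) != [1, 4]:
--         return False
--     off_suit = next(s for s in counts if counts[s] == 1)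
--     pairs = list(zip(ranks, suits))
--     for r, s in pairs:
--         if s == off_suit:
--             return sum(1 for r2, _ in pairs if r2 == r) == 2
--     return False
-- ===== Notes on version B (the rewrite author's own statement) =====
-- stated objective: simpler
-- what changed: Instead of grouping all ranks into a rank->suits dictionary and scanning its value lists for a length-2 list containing both suits, B locates the single off-suit card (the suit whose count is 1, found directly without the max-by-count step) among the zipped (rank, suit) pairs and returns whether its rank occurs exactly twice among those pairs.
import Mathlib
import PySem

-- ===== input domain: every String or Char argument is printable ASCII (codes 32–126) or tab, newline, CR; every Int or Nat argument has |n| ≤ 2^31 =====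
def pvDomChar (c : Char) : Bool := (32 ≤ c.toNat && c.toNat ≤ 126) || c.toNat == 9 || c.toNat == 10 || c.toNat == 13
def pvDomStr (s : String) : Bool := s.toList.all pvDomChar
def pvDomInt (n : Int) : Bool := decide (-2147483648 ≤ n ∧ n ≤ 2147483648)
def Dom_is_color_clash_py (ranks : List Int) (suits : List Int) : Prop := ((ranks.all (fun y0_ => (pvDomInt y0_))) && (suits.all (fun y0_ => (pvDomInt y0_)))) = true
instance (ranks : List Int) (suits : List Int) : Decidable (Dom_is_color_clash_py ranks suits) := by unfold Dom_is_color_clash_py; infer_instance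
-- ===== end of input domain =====

-- B replaces A's rank->suits grouping dictionary by directly locating the single off-suit
-- card among the zipped (rank, suit) pairs and testing whether its rank occurs exactly twice
-- there (objective: simpler decomposition, same O(n) cost).

-- ===== PORT A =====
-- helper _is_faux_flush: sorted(Counter(suits).values()) == [1, 4]
def is_faux_flush_py (suits : List Int) : Bool :=
  decide (PySem.List.sorted (PySem.Dict.counter suits).values (fun x => x) false = [1, 4])

def is_color_clash_py (ranks : List Int) (suits : List Int) : Bool :=
  if !(is_faux_flush_py suits) then false
  else
    let suit_counts := PySem.Dict.counter suits
    -- main_suit, _ = max(suit_counts.items(), key=lambda x: x[1])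
    match PySem.List.max? suit_counts.items (fun x => x.2) with
    | none => false   -- unreachable: the guard above forces a nonempty Counter (Python max would raise only here)
    | some mp =>
      let main_suit := mp.1
      -- off_suit = next(s for s in suit_counts if s != main_suit)
      match suit_counts.keys.find? (fun s => s != main_suit) with
      | none => false -- unreachable: a faux flush has two suits (Python next would raise only here)
      | some off_suit =>
        -- by_rank: for r, s in zip(ranks, suits): by_rank.setdefault(r, []).append(s)
        let by_rank := (ranks.zip suits).foldl
          (fun d p => d.modify p.1 [] (fun l => l ++ [p.2])) PySem.Dict.empty
        -- for suitelist in by_rank.values(): if len == 2 and main in and off in: return True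
        by_rank.values.any (fun sl =>
          sl.length == 2 && decide (main_suit ∈ sl) && decide (off_suit ∈ sl))

-- ===== PORT B =====
def is_color_clash_py_alt (ranks : List Int) (suits : List Int) : Bool :=
  let counts := PySem.Dict.counter suits
  if PySem.List.sorted counts.values (fun x => x) false ≠ [1, 4] then false
  else
    -- off_suit = next(s for s in counts if counts[s] == 1)
    match counts.keys.find? (fun s => counts.getD s 0 == 1) with
    | none => false -- unreachable: a faux flush has a count-1 suit (Python next would raise only here)
    | some off_suit =>
      let pairs := ranks.zip suits
      match pairs.find? (fun p => p.2 == off_suit) with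
      | none => false
      | some p => pairs.countP (fun q => q.1 == p.1) == 2

-- ===== PRECONDITION & SPEC =====
def Spec_is_color_clash_py (ranks : List Int) (suits : List Int) (out : Bool) : Prop := out = is_color_clash_py_alt ranks suits
instance (ranks : List Int) (suits : List Int) (out : Bool) : Decidable (Spec_is_color_clash_py ranks suits out) := by unfold Spec_is_color_clash_py; infer_instance

-- ===== CLAIM (what is proved, stated in full; the proofs are below) =====
def Claim_equal_is_color_clash_py : Prop := ∀ (ranks : List Int) (suits : List Int), Dom_is_color_clash_py ranks suits → Spec_is_color_clash_py ranks suits (is_color_clash_py ranks suits)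

-- ===== LEMMAS AND PROOFS =====

lemma zip_snd_sublist {α β : Type} : ∀ (xs : List α) (ys : List β), ((xs.zip ys).map Prod.snd).Sublist ys := by
  intro xs
  induction xs with
  | nil => intro ys; simp
  | cons x xs ih =>
    intro ys
    cases ys with
    | nil => simp
    | cons y ys => simpa using (ih ys).cons₂ y

-- the tails of the two ports agree whenever the off-suit o occurs exactly once in suits
-- and every suit is the main suit m or o
lemma clash_tail_eq (ranks suits : List Int) (m o : Int) (hmo : m ≠ o)
    (ho : suits.count o = 1) (hms : ∀ s ∈ suits, s = m ∨ s = o) :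
    (((ranks.zip suits).foldl (fun d p => d.modify p.1 [] (fun l => l ++ [p.2]))
        PySem.Dict.empty).values.any
        (fun sl => sl.length == 2 && decide (m ∈ sl) && decide (o ∈ sl)))
    = (match (ranks.zip suits).find? (fun p => p.2 == o) with
       | none => false
       | some p => (ranks.zip suits).countP (fun q => q.1 == p.1) == 2) := by
  set L := ranks.zip suits with hL
  set D := L.foldl (fun d p => d.modify p.1 [] (fun l => l ++ [p.2])) PySem.Dict.empty with hD
  have hnd : D.keys.Nodup := by
    rw [hD]
    exact PySem.Dict.nodup_keys_foldl_modify_key L Prod.fst [] (fun _ p l => l ++ [p.2])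
      PySem.Dict.empty (by simp [PySem.Dict.keys_empty])
  have hgetD : ∀ r : Int, D.getD r [] = (L.filter (fun p => p.1 == r)).map (fun x => x.2) := by
    intro r
    rw [hD, PySem.Dict.getD_foldl_modify_append L PySem.Dict.empty r]
    simp [PySem.Dict.getD_empty]
  have hkeys : ∀ r : Int, r ∈ D.keys ↔ r ∈ L.map Prod.fst := by
    intro r
    rw [hD, PySem.Dict.keys_foldl_modify_key L Prod.fst [] (fun _ p l => l ++ [p.2])]
    simp [PySem.Dict.keys_empty, PySem.Set.update_nil_left, PySem.Set.mem_ofList]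
  have hvals : D.values = D.keys.map (fun r => D.getD r []) :=
    PySem.Dict.values_eq_map_keys D hnd []
  have hsnd : ∀ p ∈ L, p.2 ∈ suits := by
    intro p hp
    exact (List.of_mem_zip (a := p.1) (b := p.2) (by simpa using hp)).2
  have hcount1 : L.countP (fun q => q.2 == o) ≤ 1 := by
    have h1 : L.countP (fun q => q.2 == o) = (L.map Prod.snd).count o := by
      rw [List.count, List.countP_map]; rfl
    have h2 : (L.map Prod.snd).count o ≤ suits.count o :=
      List.Sublist.count_le o (zip_snd_sublist ranks suits)
    omega
  cases hfind : L.find? (fun p => p.2 == o) with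
  | none =>
    have hno : ∀ p ∈ L, p.2 ≠ o := by
      intro p hp
      have := List.find?_eq_none.mp hfind p hp
      simpa using this
    rw [List.any_eq_false]
    intro sl hsl
    rw [hvals] at hsl
    obtain ⟨r, hr, rfl⟩ := List.mem_map.mp hsl
    rw [hgetD r]
    simp only [Bool.and_eq_true, decide_eq_true_eq, not_and]
    intro _ hob
    obtain ⟨q, hq, hq2⟩ := List.mem_map.mp hob
    exact hno q (List.mem_of_mem_filter hq) hq2
  | some p =>
    have hp2 : p.2 = o := by simpa using List.find?_some hfind
    have hpL : p ∈ L := List.mem_of_find?_eq_some hfind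
    by_cases hc : L.countP (fun q => q.1 == p.1) = 2
    · simp only [hc]
      show _ = true
      rw [List.any_eq_true]
      refine ⟨(L.filter (fun q => q.1 == p.1)).map (fun x => x.2), ?_, ?_⟩
      · rw [hvals]
        refine List.mem_map.mpr ⟨p.1, (hkeys p.1).mpr (List.mem_map.mpr ⟨p, hpL, rfl⟩), hgetD p.1⟩
      · have hlen : ((L.filter (fun q => q.1 == p.1)).map (fun x => x.2)).length = 2 := by
          rw [List.length_map, ← List.countP_eq_length_filter, hc]
        have hoin : o ∈ (L.filter (fun q => q.1 == p.1)).map (fun x => x.2) :=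
          List.mem_map.mpr ⟨p, List.mem_filter.mpr ⟨hpL, by simp⟩, hp2⟩
        have hmin : m ∈ (L.filter (fun q => q.1 == p.1)).map (fun x => x.2) := by
          set sl := (L.filter (fun q => q.1 == p.1)).map (fun x => x.2) with hsl
          have hmem : ∀ x ∈ sl, x = m ∨ x = o := by
            intro x hx
            obtain ⟨q, hq, rfl⟩ := List.mem_map.mp hx
            exact hms q.2 (hsnd q (List.mem_of_mem_filter hq))
          have hco : sl.count o ≤ 1 := by
            have h1 : sl.count o = (L.filter (fun q => q.1 == p.1)).countP (fun q => q.2 == o) := by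
              rw [List.count, hsl, List.countP_map]; rfl
            have h2 : (L.filter (fun q => q.1 == p.1)).countP (fun q => q.2 == o)
                ≤ L.countP (fun q => q.2 == o) :=
              List.Sublist.countP_le List.filter_sublist
            omega
          obtain ⟨x, y, hxy⟩ := List.length_eq_two.mp hlen
          rw [hxy] at hmem hco hoin ⊢
          rcases hmem x (by simp) with rfl | rfl
          · simp
          · rcases hmem y (by simp) with rfl | rfl
            · simp
            · simp at hco
        simp [hlen, hmin, hoin]
    · have hrhs : (L.countP (fun q => q.1 == p.1) == 2) = false := by
        simpa using hc
      show _ = (L.countP (fun q => q.1 == p.1) == 2)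
      rw [hrhs, List.any_eq_false]
      intro sl hsl
      rw [hvals] at hsl
      obtain ⟨r, hr, rfl⟩ := List.mem_map.mp hsl
      rw [hgetD r]
      simp only [Bool.and_eq_true, decide_eq_true_eq, not_and, beq_iff_eq, and_imp]
      intro hlen _ hob
      obtain ⟨q, hq, hq2⟩ := List.mem_map.mp hob
      -- p and q are both occurrences of the unique off-suit card, hence equal
      have hpF : p ∈ L.filter (fun q => q.2 == o) := List.mem_filter.mpr ⟨hpL, by simp [hp2]⟩
      have hqF : q ∈ L.filter (fun q => q.2 == o) :=
        List.mem_filter.mpr ⟨List.mem_of_mem_filter hq, by simp [hq2]⟩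
      have hflen : (L.filter (fun q => q.2 == o)).length ≤ 1 := by
        rw [← List.countP_eq_length_filter]; exact hcount1
      have hpq : p = q := by
        cases hF : L.filter (fun q => q.2 == o) with
        | nil => rw [hF] at hpF; simp at hpF
        | cons z t =>
          rw [hF] at hpF hqF hflen
          have ht : t = [] := by
            simp only [List.length_cons] at hflen
            exact List.eq_nil_of_length_eq_zero (by omega)
          rw [ht] at hpF hqF
          simp at hpF hqF
          rw [hpF, hqF]
      have hq1 : q.1 = r := by simpa using (List.mem_filter.mp hq).2
      apply hc
      rw [hpq, hq1, List.countP_eq_length_filter, ← List.length_map (f := fun (x : Int × Int) => x.2), hlen]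

theorem is_color_clash_py_eq (ranks suits : List Int) :
    is_color_clash_py ranks suits = is_color_clash_py_alt ranks suits := by
  by_cases hf : PySem.List.sorted (PySem.Dict.counter suits).values (fun x => x) false = [1, 4]
  · -- faux flush holds: analyse the structure of the counter
    have hv : (PySem.Dict.counter suits).values
        = (PySem.Set.ofList suits).map (fun k => ((suits.count k : Int))) := by
      rw [PySem.Dict.values_eq_map_keys _ (PySem.Dict.nodup_keys_counter suits) 0,
        PySem.Dict.keys_counter]
      exact List.map_congr_left (fun k _ => PySem.Dict.getD_counter suits k)
    have hperm : ([1, 4] : List Int).Perm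
        ((PySem.Set.ofList suits).map (fun k => ((suits.count k : Int)))) := by
      rw [← hv, ← hf]
      exact PySem.List.sorted_perm _ _ _
    have hlen2 : (PySem.Set.ofList suits).length = 2 := by
      have := hperm.length_eq
      simpa using this.symm
    obtain ⟨a, b, hS⟩ := List.length_eq_two.mp hlen2
    have hab : a ≠ b := by
      have hnd := PySem.Set.nodup_ofList (xs := suits)
      rw [hS] at hnd
      exact (List.pairwise_cons.mp hnd).1 b (by simp)
    have hmem_s : ∀ s ∈ suits, s = a ∨ s = b := by
      intro s hs
      have : s ∈ PySem.Set.ofList suits := (PySem.Set.mem_ofList suits s).mpr hs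
      rw [hS] at this
      simpa using this
    rw [hS] at hperm
    simp only [List.map_cons, List.map_nil] at hperm
    have hcase : ((suits.count a : Int) = 1 ∧ (suits.count b : Int) = 4)
        ∨ ((suits.count a : Int) = 4 ∧ (suits.count b : Int) = 1) := by
      have hca := hperm.mem_iff (a := (suits.count a : Int)) |>.mpr (by simp)
      have hcb := hperm.mem_iff (a := (suits.count b : Int)) |>.mpr (by simp)
      simp only [List.mem_cons, List.not_mem_nil, or_false] at hca hcb
      have h1 : (1 : Int) ∈ [(suits.count a : Int), (suits.count b : Int)] :=
        hperm.mem_iff.mp (by simp)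
      have h4 : (4 : Int) ∈ [(suits.count a : Int), (suits.count b : Int)] :=
        hperm.mem_iff.mp (by simp)
      simp only [List.mem_cons, List.not_mem_nil, or_false] at h1 h4
      omega
    have hkeys : (PySem.Dict.counter suits).keys = [a, b] := by
      rw [PySem.Dict.keys_counter, hS]
    rcases hcase with ⟨hca, hcb⟩ | ⟨hca, hcb⟩
    · -- counts: a ↦ 1 (off suit), b ↦ 4 (main suit)
      have hcaN : suits.count a = 1 := by exact_mod_cast hca
      have hitems : (PySem.Dict.counter suits).items = [(a, (1 : Int)), (b, 4)] := by
        rw [PySem.Dict.items_counter, hS]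
        simp [hca, hcb]
      have hmax : PySem.List.max? (PySem.Dict.counter suits).items (fun x => x.2)
          = some (b, 4) := by
        rw [hitems]; simp [PySem.List.max?]
      have hfindA : ([a, b].find? (fun s => s != b)) = some a := by
        have hne : (a != b) = true := by simp [hab]
        simp [List.find?, hne]
      have hfindB : ([a, b].find? (fun s => (PySem.Dict.counter suits).getD s 0 == 1))
          = some a := by
        simp [List.find?, PySem.Dict.getD_counter, hca]
      simp only [is_color_clash_py, is_color_clash_py_alt, is_faux_flush_py, hf, hkeys,
        decide_true, Bool.not_true, Bool.false_eq_true, if_false, ne_eq, not_true_eq_false,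
        hmax, hfindA, hfindB]
      exact clash_tail_eq ranks suits b a (Ne.symm hab) hcaN
        (fun s hs => (hmem_s s hs).symm)
    · -- counts: a ↦ 4 (main suit), b ↦ 1 (off suit)
      have hcbN : suits.count b = 1 := by exact_mod_cast hcb
      have hitems : (PySem.Dict.counter suits).items = [(a, (4 : Int)), (b, 1)] := by
        rw [PySem.Dict.items_counter, hS]
        simp [hca, hcb]
      have hmax : PySem.List.max? (PySem.Dict.counter suits).items (fun x => x.2)
          = some (a, 4) := by
        rw [hitems]; simp [PySem.List.max?]
      have hfindA : ([a, b].find? (fun s => s != a)) = some b := by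
        have hne : (b != a) = true := by simp [Ne.symm hab]
        simp [List.find?, hne]
      have hfindB : ([a, b].find? (fun s => (PySem.Dict.counter suits).getD s 0 == 1))
          = some b := by
        simp [List.find?, PySem.Dict.getD_counter, hca, hcb]
      simp only [is_color_clash_py, is_color_clash_py_alt, is_faux_flush_py, hf, hkeys,
        decide_true, Bool.not_true, Bool.false_eq_true, if_false, ne_eq, not_true_eq_false,
        hmax, hfindA, hfindB]
      exact clash_tail_eq ranks suits a b hab hcbN hmem_s
  · simp [is_color_clash_py, is_color_clash_py_alt, is_faux_flush_py, hf]

-- ===== VERDICT (by name: the statement is the Claim_ definition above) =====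
theorem is_color_clash_py_spec : Claim_equal_is_color_clash_py := by
  intro ranks suits _
  unfold Spec_is_color_clash_py
  exact is_color_clash_py_eq ranks suits
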